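-- pv_equiv track=rewrite | github.com/unbalancedparentheses/DNA | genetic_health/reports/section_builders.py | generate_pharmgkb_report
-- ===== SOURCE A (Python) =====
-- def format_evidence_level(level):
--     """Format PharmGKB evidence level."""
--     if level == "1A":
--         return "\U0001f535 1A - Clinical guideline annotation"
--     elif level == "1B":
--         return "\U0001f535 1B - Clinical guideline annotation"
--     elif level == "2A":
--         return "\U0001f7e3 2A - Variant has moderate evidence"
--     elif level == "2B":
--         return "\U0001f7e3 2B - Variant has moderate evidence"
--     else:
--         return f"\u26ab {level}"
--
-- def generate_pharmgkb_section(finding, index):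
--     """Generate a comprehensive section for a PharmGKB drug interaction."""
--     gene = finding.get('gene', 'Unknown')
--     rsid = finding.get('rsid', '')
--     drugs = finding.get('drugs', '')
--     genotype = finding.get('genotype', '')
--     annotation = finding.get('annotation', '')
--     level = finding.get('level', '')
--     category = finding.get('category', 'Other')
--
--     section = []
--     section.append(f"### {index}. {gene} - {rsid}")
--     section.append("")
--     section.append(f"**Evidence Level:** {format_evidence_level(level)}  ")
--     section.append(f"**Category:** {category}  ")
--     section.append(f"**Your Genotype:** `{genotype}`  ")
--     section.append(f"**Affected Drugs:** {drugs}")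
--     section.append("")
--     section.append("#### Clinical Annotation")
--     section.append(annotation)
--     section.append("")
--
--     if level in ["1A", "1B"]:
--         section.append("#### Clinical Significance")
--         section.append("This is a high-evidence drug-gene interaction with clinical guideline support. Discuss with prescribing physicians before starting these medications.")
--
--     section.append("---")
--     section.append("")
--
--     return "\n".join(section)
--
-- def generate_pharmgkb_report(pharmgkb):
--     """Generate comprehensive pharmacogenomics section."""
--     lines = []
--     lines.append("## \U0001f48a Pharmacogenomics - Complete Drug-Gene Interactions")
--     lines.append("")
--     lines.append("This section contains all drug-gene interactions from PharmGKB with clinical annotations.")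
--     lines.append("Share this information with prescribing physicians before starting new medications.")
--     lines.append("")
--
--     level_1a = [f for f in pharmgkb if f.get('level') == '1A']
--     level_1b = [f for f in pharmgkb if f.get('level') == '1B']
--     level_2a = [f for f in pharmgkb if f.get('level') == '2A']
--     level_2b = [f for f in pharmgkb if f.get('level') == '2B']
--
--     if level_1a:
--         lines.append("### Level 1A - Highest Evidence (Clinical Guideline Annotations)")
--         lines.append("")
--         for i, finding in enumerate(level_1a, 1):
--             lines.append(generate_pharmgkb_section(finding, i))
--
--     if level_1b:
--         lines.append("### Level 1B - High Evidence (Clinical Guideline Annotations)")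
--         lines.append("")
--         for i, finding in enumerate(level_1b, 1):
--             lines.append(generate_pharmgkb_section(finding, i))
--
--     if level_2a:
--         lines.append("### Level 2A - Moderate Evidence")
--         lines.append("")
--         for i, finding in enumerate(level_2a, 1):
--             lines.append(generate_pharmgkb_section(finding, i))
--
--     if level_2b:
--         lines.append("### Level 2B - Moderate Evidence")
--         lines.append("")
--         for i, finding in enumerate(level_2b, 1):
--             lines.append(generate_pharmgkb_section(finding, i))
--
--     return "\n".join(lines)
-- ===== SOURCE B (Python) =====
-- def format_evidence_level(level):
--     """Format PharmGKB evidence level."""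
--     if level == "1A":
--         return "\U0001f535 1A - Clinical guideline annotation"
--     elif level == "1B":
--         return "\U0001f535 1B - Clinical guideline annotation"
--     elif level == "2A":
--         return "\U0001f7e3 2A - Variant has moderate evidence"
--     elif level == "2B":
--         return "\U0001f7e3 2B - Variant has moderate evidence"
--     else:
--         return f"\u26ab {level}"
--
-- def generate_pharmgkb_section(finding, index):
--     """Generate a comprehensive section for a PharmGKB drug interaction."""
--     gene = finding.get('gene', 'Unknown')
--     rsid = finding.get('rsid', '')
--     drugs = finding.get('drugs', '')
--     genotype = finding.get('genotype', '')
--     annotation = finding.get('annotation', '')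
--     level = finding.get('level', '')
--     category = finding.get('category', 'Other')
--
--     section = []
--     section.append(f"### {index}. {gene} - {rsid}")
--     section.append("")
--     section.append(f"**Evidence Level:** {format_evidence_level(level)}  ")
--     section.append(f"**Category:** {category}  ")
--     section.append(f"**Your Genotype:** `{genotype}`  ")
--     section.append(f"**Affected Drugs:** {drugs}")
--     section.append("")
--     section.append("#### Clinical Annotation")
--     section.append(annotation)
--     section.append("")
--
--     if level in ["1A", "1B"]:
--         section.append("#### Clinical Significance")
--         section.append("This is a high-evidence drug-gene interaction with clinical guideline support. Discuss with prescribing physicians before starting these medications.")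
--
--     section.append("---")
--     section.append("")
--
--     return "\n".join(section)
--
-- def generate_pharmgkb_report(pharmgkb):
--     """One group-by pass over pharmgkb, then the four sections read their bucket from the dict."""
--     lines = [
--         "## \U0001f48a Pharmacogenomics - Complete Drug-Gene Interactions",
--         "",
--         "This section contains all drug-gene interactions from PharmGKB with clinical annotations.",
--         "Share this information with prescribing physicians before starting new medications.",
--         "",
--     ]
--     groups = {}
--     for f in pharmgkb:
--         key = f.get('level')
--         groups[key] = groups.get(key, []) + [f]
--     for level, header in [
--         ('1A', "### Level 1A - Highest Evidence (Clinical Guideline Annotations)"),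
--         ('1B', "### Level 1B - High Evidence (Clinical Guideline Annotations)"),
--         ('2A', "### Level 2A - Moderate Evidence"),
--         ('2B', "### Level 2B - Moderate Evidence"),
--     ]:
--         bucket = groups.get(level, [])
--         if bucket:
--             lines.append(header)
--             lines.append("")
--             for i, finding in enumerate(bucket, 1):
--                 lines.append(generate_pharmgkb_section(finding, i))
--     return "\n".join(lines)
-- ===== Notes on version B (the rewrite author's own statement) =====
-- stated objective: alternative
-- what changed: A's four separate filter scans over pharmgkb are replaced by a single group-by pass that buckets findings into a dict keyed by their 'level' value, after which the four sections read their bucket with a dict lookup.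
import Mathlib
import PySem

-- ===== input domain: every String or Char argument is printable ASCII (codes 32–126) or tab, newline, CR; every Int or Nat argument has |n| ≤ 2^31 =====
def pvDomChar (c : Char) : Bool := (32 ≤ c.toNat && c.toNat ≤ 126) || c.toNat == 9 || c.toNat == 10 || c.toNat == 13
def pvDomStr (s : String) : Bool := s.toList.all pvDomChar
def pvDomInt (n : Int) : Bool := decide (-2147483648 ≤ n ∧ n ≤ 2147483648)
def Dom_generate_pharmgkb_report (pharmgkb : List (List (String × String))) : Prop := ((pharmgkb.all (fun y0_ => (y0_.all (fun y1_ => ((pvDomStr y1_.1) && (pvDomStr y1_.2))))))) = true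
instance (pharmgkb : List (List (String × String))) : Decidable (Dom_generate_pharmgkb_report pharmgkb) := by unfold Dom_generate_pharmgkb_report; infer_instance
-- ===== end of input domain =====

-- B replaces A's four separate filter scans by one group-by pass over pharmgkb plus four dict
-- lookups (objective: alternative decomposition); the emitted text is identical.

-- ===== PORT A =====
def formatEvidenceLevel (level : String) : String :=
  if level == "1A" then "🔵 1A - Clinical guideline annotation"
  else if level == "1B" then "🔵 1B - Clinical guideline annotation"
  else if level == "2A" then "🟣 2A - Variant has moderate evidence"
  else if level == "2B" then "🟣 2B - Variant has moderate evidence"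
  else "⚫ " ++ level

def pharmgkbSection (finding : List (String × String)) (index : Int) : String :=
  let d := PySem.Dict.ofList finding
  let gene := d.getD "gene" "Unknown"
  let rsid := d.getD "rsid" ""
  let drugs := d.getD "drugs" ""
  let genotype := d.getD "genotype" ""
  let annotation := d.getD "annotation" ""
  let level := d.getD "level" ""
  let category := d.getD "category" "Other"
  let sec : List String :=
    ["### " ++ PySem.Int.toStr index ++ ". " ++ gene ++ " - " ++ rsid,
     "",
     "**Evidence Level:** " ++ formatEvidenceLevel level ++ "  ",
     "**Category:** " ++ category ++ "  ",
     "**Your Genotype:** `" ++ genotype ++ "`  ",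
     "**Affected Drugs:** " ++ drugs,
     "",
     "#### Clinical Annotation",
     annotation,
     ""]
  let sec := if level == "1A" || level == "1B" then
      sec ++ ["#### Clinical Significance",
              "This is a high-evidence drug-gene interaction with clinical guideline support. Discuss with prescribing physicians before starting these medications."]
    else sec
  let sec := sec ++ ["---", ""]
  PySem.Str.join "\n" sec

def generate_pharmgkb_report (pharmgkb : List (List (String × String))) : String :=
  let lines : List String :=
    ["## 💊 Pharmacogenomics - Complete Drug-Gene Interactions",
     "",
     "This section contains all drug-gene interactions from PharmGKB with clinical annotations.",
     "Share this information with prescribing physicians before starting new medications.",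
     ""]
  let level_1a := pharmgkb.filter (fun f => (PySem.Dict.ofList f).get? "level" == some "1A")
  let level_1b := pharmgkb.filter (fun f => (PySem.Dict.ofList f).get? "level" == some "1B")
  let level_2a := pharmgkb.filter (fun f => (PySem.Dict.ofList f).get? "level" == some "2A")
  let level_2b := pharmgkb.filter (fun f => (PySem.Dict.ofList f).get? "level" == some "2B")
  let lines := if level_1a.isEmpty then lines else
    (PySem.List.enumerate level_1a 1).foldl (fun acc p => acc ++ [pharmgkbSection p.2 p.1])
      (lines ++ ["### Level 1A - Highest Evidence (Clinical Guideline Annotations)", ""])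
  let lines := if level_1b.isEmpty then lines else
    (PySem.List.enumerate level_1b 1).foldl (fun acc p => acc ++ [pharmgkbSection p.2 p.1])
      (lines ++ ["### Level 1B - High Evidence (Clinical Guideline Annotations)", ""])
  let lines := if level_2a.isEmpty then lines else
    (PySem.List.enumerate level_2a 1).foldl (fun acc p => acc ++ [pharmgkbSection p.2 p.1])
      (lines ++ ["### Level 2A - Moderate Evidence", ""])
  let lines := if level_2b.isEmpty then lines else
    (PySem.List.enumerate level_2b 1).foldl (fun acc p => acc ++ [pharmgkbSection p.2 p.1])
      (lines ++ ["### Level 2B - Moderate Evidence", ""])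
  PySem.Str.join "\n" lines

-- ===== PORT B =====
def generate_pharmgkb_report_alt (pharmgkb : List (List (String × String))) : String :=
  let lines : List String :=
    ["## 💊 Pharmacogenomics - Complete Drug-Gene Interactions",
     "",
     "This section contains all drug-gene interactions from PharmGKB with clinical annotations.",
     "Share this information with prescribing physicians before starting new medications.",
     ""]
  -- groups[key] = groups.get(key, []) + [f], key = f.get('level')
  let groups := pharmgkb.foldl
    (fun d f => d.modify ((PySem.Dict.ofList f).get? "level") [] (· ++ [f]))
    (PySem.Dict.empty : PySem.Dict (Option String) (List (List (String × String))))
  let lines := [("1A", "### Level 1A - Highest Evidence (Clinical Guideline Annotations)"),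
                ("1B", "### Level 1B - High Evidence (Clinical Guideline Annotations)"),
                ("2A", "### Level 2A - Moderate Evidence"),
                ("2B", "### Level 2B - Moderate Evidence")].foldl
    (fun ls lh =>
      let bucket := groups.getD (some lh.1) []
      if bucket.isEmpty then ls else
        (PySem.List.enumerate bucket 1).foldl (fun acc p => acc ++ [pharmgkbSection p.2 p.1])
          (ls ++ [lh.2, ""])) lines
  PySem.Str.join "\n" lines

-- ===== PRECONDITION & SPEC =====
def Spec_generate_pharmgkb_report (pharmgkb : List (List (String × String))) (out : String) : Prop := out = generate_pharmgkb_report_alt pharmgkb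
instance (pharmgkb : List (List (String × String))) (out : String) : Decidable (Spec_generate_pharmgkb_report pharmgkb out) := by unfold Spec_generate_pharmgkb_report; infer_instance

-- ===== CLAIM (what is proved, stated in full; the proofs are below) =====
def Claim_equal_generate_pharmgkb_report : Prop := ∀ (pharmgkb : List (List (String × String))), Dom_generate_pharmgkb_report pharmgkb → Spec_generate_pharmgkb_report pharmgkb (generate_pharmgkb_report pharmgkb)

-- ===== LEMMAS AND PROOFS =====
-- B's group-by bucket for key `some c` is exactly A's filter for level c.
theorem bucket_eq_filter (pharmgkb : List (List (String × String))) (c : Option String) :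
    (pharmgkb.foldl
      (fun d f => d.modify ((PySem.Dict.ofList f).get? "level") [] (· ++ [f]))
      (PySem.Dict.empty : PySem.Dict (Option String) (List (List (String × String))))).getD c []
    = pharmgkb.filter (fun f => (PySem.Dict.ofList f).get? "level" == c) := by
  have h := PySem.Dict.getD_foldl_modify_append
    (l := pharmgkb.map (fun f => ((PySem.Dict.ofList f).get? "level", f)))
    (d := (PySem.Dict.empty : PySem.Dict (Option String) (List (List (String × String))))) (c := c)
  simp only [List.foldl_map] at h
  rw [h]
  simp [List.filter_map, Function.comp_def]

-- ===== VERDICT (by name: the statement is the Claim_ definition above) =====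
theorem generate_pharmgkb_report_spec : Claim_equal_generate_pharmgkb_report := by
  intro pharmgkb _
  unfold Spec_generate_pharmgkb_report generate_pharmgkb_report generate_pharmgkb_report_alt
  simp only [List.foldl_cons, List.foldl_nil, bucket_eq_filter]
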